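-- pv_equiv track=rewrite | github.com/Liedleee/s5prakfungsional | Pertemuan3/Tugas1/TugasB.py | arithmetic_geometric_sequence
-- ===== SOURCE A (Python) =====
-- def arithmetic_geometric_sequence(a, d, r, n):
--     if n == 1:
--         return [a]
--     else:
--         prev_sequence = arithmetic_geometric_sequence(a, d, r, n - 1)
--         an = (a + (n - 1) * d) * (r ** (n - 1))
--         prev_sequence.append(an)
--         return prev_sequence
-- ===== SOURCE B (Python) =====
-- def arithmetic_geometric_sequence(a, d, r, n):
--     seq = []
--     term = a
--     power = 1
--     for _ in range(n):
--         seq.append(term * power)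
--         term += d
--         power *= r
--     return seq
-- ===== Notes on version B (the rewrite author's own statement) =====
-- stated objective: faster
-- what changed: Replaced depth-n recursion with per-term exponentiation r**(n-1) by a single iterative pass maintaining running term and running power.
import Mathlib
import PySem

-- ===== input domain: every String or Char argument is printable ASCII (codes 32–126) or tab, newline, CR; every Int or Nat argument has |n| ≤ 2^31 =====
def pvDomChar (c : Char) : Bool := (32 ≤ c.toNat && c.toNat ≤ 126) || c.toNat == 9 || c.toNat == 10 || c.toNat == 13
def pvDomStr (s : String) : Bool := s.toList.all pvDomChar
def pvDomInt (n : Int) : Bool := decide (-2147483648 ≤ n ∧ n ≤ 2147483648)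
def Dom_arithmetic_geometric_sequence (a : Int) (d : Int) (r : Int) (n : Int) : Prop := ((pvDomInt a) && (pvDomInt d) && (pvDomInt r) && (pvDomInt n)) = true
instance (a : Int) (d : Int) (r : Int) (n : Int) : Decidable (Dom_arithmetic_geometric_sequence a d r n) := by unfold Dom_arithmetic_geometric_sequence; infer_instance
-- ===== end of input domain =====

-- B replaces A's depth-n recursion with repeated exponentiation by one iterative pass
-- keeping a running term and a running power (objective: faster).

-- ===== PORT A =====
-- A recurses on n; Python raises RecursionError for n ≤ 0 (excluded by Pre_),
-- so the port recurses on n.toNat, the k = 0 case being unreachable under Pre_.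
def agsA (a : Int) (d : Int) (r : Int) : Nat → List Int
  | 0 => []
  | 1 => [a]
  | Nat.succ m => agsA a d r m ++ [(a + (m : Int) * d) * r ^ m]

def arithmetic_geometric_sequence (a : Int) (d : Int) (r : Int) (n : Int) : List Int :=
  agsA a d r n.toNat

-- ===== PORT B =====
-- the loop body of Source B: state (term, power), one term emitted per iteration
def agsB (d : Int) (r : Int) : Nat → Int → Int → List Int
  | 0, _, _ => []
  | Nat.succ k, term, power => term * power :: agsB d r k (term + d) (power * r)

def arithmetic_geometric_sequence_alt (a : Int) (d : Int) (r : Int) (n : Int) : List Int :=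
  agsB d r n.toNat a 1

-- ===== PRECONDITION & SPEC =====
-- Pre_ excludes n ≤ 0, on which Python A raises RecursionError.
def Pre_arithmetic_geometric_sequence (a : Int) (d : Int) (r : Int) (n : Int) : Prop := 1 ≤ n
instance (a : Int) (d : Int) (r : Int) (n : Int) : Decidable (Pre_arithmetic_geometric_sequence a d r n) := by unfold Pre_arithmetic_geometric_sequence; infer_instance
def pvWitness_arithmetic_geometric_sequence : Int × Int × Int × Int := (2, 3, 2, 4)

def Spec_arithmetic_geometric_sequence (a : Int) (d : Int) (r : Int) (n : Int) (out : List Int) : Prop := out = arithmetic_geometric_sequence_alt a d r n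
instance (a : Int) (d : Int) (r : Int) (n : Int) (out : List Int) : Decidable (Spec_arithmetic_geometric_sequence a d r n out) := by unfold Spec_arithmetic_geometric_sequence; infer_instance

-- ===== CLAIM (what is proved, stated in full; the proofs are below) =====
def Claim_equal_arithmetic_geometric_sequence : Prop := ∀ (a : Int) (d : Int) (r : Int) (n : Int), Dom_arithmetic_geometric_sequence a d r n → Pre_arithmetic_geometric_sequence a d r n → Spec_arithmetic_geometric_sequence a d r n (arithmetic_geometric_sequence a d r n)

-- ===== LEMMAS AND PROOFS =====

-- closed form shared by both ports: term i (0-based) is (a + i·d)·r^i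
theorem agsA_succ_succ (a d r : Int) (m : Nat) :
    agsA a d r (m + 2) = agsA a d r (m + 1) ++ [(a + ((m + 1 : Nat) : Int) * d) * r ^ (m + 1)] := rfl

theorem agsA_closed (a d r : Int) (m : Nat) :
    agsA a d r (m + 1) = (List.range (m + 1)).map (fun (i : Nat) => (a + (i : Int) * d) * r ^ i) := by
  induction m with
  | zero => simp [agsA]
  | succ k ih =>
    rw [show k + 1 + 1 = k + 2 from rfl, agsA_succ_succ, ih]
    simp [List.range_succ]

theorem agsB_closed (d r : Int) (k : Nat) :
    ∀ (term power : Int),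
      agsB d r k term power = (List.range k).map (fun (i : Nat) => (term + (i : Int) * d) * (power * r ^ i)) := by
  induction k with
  | zero => intro term power; simp [agsB]
  | succ m ih =>
    intro term power
    rw [agsB, ih, List.range_succ_eq_map, List.map_cons, List.map_map]
    congr 1
    · push_cast; ring
    · apply List.map_congr_left
      intro i _
      simp only [Function.comp]
      push_cast [pow_succ]
      ring

-- ===== VERDICT (by name: the statement is the Claim_ definition above) =====
theorem arithmetic_geometric_sequence_spec : Claim_equal_arithmetic_geometric_sequence := by
  intro a d r n _ hpre
  unfold Spec_arithmetic_geometric_sequence arithmetic_geometric_sequence arithmetic_geometric_sequence_alt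
  obtain ⟨m, hm⟩ : ∃ m : Nat, n.toNat = m + 1 := by
    refine ⟨n.toNat - 1, ?_⟩
    have : 1 ≤ n := hpre
    omega
  rw [hm, agsA_closed, agsB_closed]
  simp
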